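-- pv_equiv track=rewrite | github.com/creigcavanaugh/need4speed-cv | car_speed_tracker.py | is_consistent_direction
-- ===== SOURCE A (Python) =====
-- def is_consistent_direction(positions):
--     if len(positions) < 2:
--         return False
--     deltas = [positions[i+1][0] - positions[i][0] for i in range(len(positions) - 1)]
--     nonzero_deltas = [d for d in deltas if d != 0]
--     if not nonzero_deltas:
--         return False
--     return all(d > 0 for d in nonzero_deltas) or all(d < 0 for d in nonzero_deltas)
-- ===== SOURCE B (Python) =====
-- def is_consistent_direction(positions):
--     xs = [p[0] for p in positions]
--     return (xs == sorted(xs) or xs == sorted(xs, reverse=True)) and len(set(xs)) > 1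
-- ===== Notes on version B (the rewrite author's own statement) =====
-- stated objective: simpler
-- what changed: Replaces the delta-list construction, nonzero filtering and double all-scan with a monotonicity test by comparing the x-list against its sorted and reverse-sorted versions, guarded by a set-cardinality distinctness check.
import Mathlib
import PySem

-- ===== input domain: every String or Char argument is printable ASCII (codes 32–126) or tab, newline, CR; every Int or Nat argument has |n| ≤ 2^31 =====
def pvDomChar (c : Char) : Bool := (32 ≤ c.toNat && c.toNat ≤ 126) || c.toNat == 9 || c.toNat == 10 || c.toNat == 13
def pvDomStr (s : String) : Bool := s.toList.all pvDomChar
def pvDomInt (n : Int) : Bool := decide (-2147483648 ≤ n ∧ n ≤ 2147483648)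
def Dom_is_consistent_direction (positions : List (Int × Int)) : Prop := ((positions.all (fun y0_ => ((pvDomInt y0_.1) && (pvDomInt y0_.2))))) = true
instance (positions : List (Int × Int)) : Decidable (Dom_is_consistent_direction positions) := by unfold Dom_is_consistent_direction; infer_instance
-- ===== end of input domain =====

-- B replaces A's delta list + filter + double all-scan by a sorted-comparison monotonicity
-- test plus a set-cardinality distinctness check (objective: simpler).

-- ===== PORT A =====
-- the indices i and i+1 are always in range for i in range(len-1), so the (0,0) default of
-- pyGetD is never reached; otherwise a literal transliteration of A
def is_consistent_direction (positions : List (Int × Int)) : Bool :=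
  if positions.length < 2 then false
  else
    let deltas := (PySem.List.pyRange 0 ((positions.length : Int) - 1) 1).map
      (fun i => (PySem.List.pyGetD positions (i + 1) (0, 0)).1 -
                (PySem.List.pyGetD positions i (0, 0)).1)
    let nonzero := deltas.filter (fun d => d ≠ 0)
    if nonzero = [] then false
    else nonzero.all (fun d => decide (0 < d)) || nonzero.all (fun d => decide (d < 0))

-- ===== PORT B =====
def is_consistent_direction_alt (positions : List (Int × Int)) : Bool :=
  let xs := positions.map Prod.fst
  (decide (xs = PySem.List.sorted xs (fun x => x) false) ||
   decide (xs = PySem.List.sorted xs (fun x => x) true)) &&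
  decide (1 < (PySem.Set.ofList xs).length)

-- ===== PRECONDITION & SPEC =====
def Spec_is_consistent_direction (positions : List (Int × Int)) (out : Bool) : Prop := out = is_consistent_direction_alt positions
instance (positions : List (Int × Int)) (out : Bool) : Decidable (Spec_is_consistent_direction positions out) := by unfold Spec_is_consistent_direction; infer_instance

-- ===== CLAIM (what is proved, stated in full; the proofs are below) =====
def Claim_equal_is_consistent_direction : Prop := ∀ (positions : List (Int × Int)), Dom_is_consistent_direction positions → Spec_is_consistent_direction positions (is_consistent_direction positions)

-- ===== LEMMAS AND PROOFS =====

-- adjacent deltas of a list of ints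
def dts (xs : List Int) : List Int := List.zipWith (fun b a => b - a) xs.tail xs

theorem dts_nil : dts [] = [] := rfl
theorem dts_single (a : Int) : dts [a] = [] := rfl
theorem dts_cons (a b : Int) (t : List Int) : dts (a :: b :: t) = (b - a) :: dts (b :: t) := rfl

-- A's comprehension equals the structural delta list of the x-coordinates
theorem deltas_bridge (ps : List (Int × Int)) :
    (PySem.List.pyRange 0 ((ps.length : Int) - 1) 1).map
      (fun i => (PySem.List.pyGetD ps (i + 1) (0, 0)).1 -
                (PySem.List.pyGetD ps i (0, 0)).1)
    = dts (ps.map Prod.fst) := by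
  apply List.ext_getElem
  · simp only [List.length_map, PySem.List.length_pyRange_one, dts, List.length_zipWith,
      List.length_tail]
    omega
  · intro k h1 h2
    have hk : k < ps.length - 1 := by
      simpa [PySem.List.length_pyRange_one] using h1
    have hk1 : k + 1 < ps.length := by omega
    have hk0 : k < ps.length := by omega
    simp only [List.getElem_map, PySem.List.getElem_pyRange_one, dts, List.getElem_zipWith]
    have e1 : (0 : Int) + (k : Int) + 1 = ((k + 1 : Nat) : Int) := by push_cast; ring
    have e2 : (0 : Int) + (k : Int) = ((k : Nat) : Int) := by omega
    rw [e1, e2, PySem.List.pyGetD_natCast, PySem.List.pyGetD_natCast,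
        List.getD_eq_getElem _ _ hk1, List.getD_eq_getElem _ _ hk0]
    simp [List.getElem_tail]

theorem dts_forall_nonneg : ∀ xs : List Int, (∀ d ∈ dts xs, 0 ≤ d) ↔ List.IsChain (· ≤ ·) xs
  | [] => by simp [dts_nil]
  | [a] => by simp [dts_single, List.isChain_singleton a]
  | a :: b :: t => by
    rw [dts_cons, List.isChain_cons_cons]
    simp only [List.mem_cons]
    constructor
    · intro h
      refine ⟨by have := h (b - a) (Or.inl rfl); omega, ?_⟩
      exact (dts_forall_nonneg (b :: t)).1 (fun d hd => h d (Or.inr hd))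
    · rintro ⟨hab, hc⟩ d hd
      rcases hd with rfl | hd
      · omega
      · exact (dts_forall_nonneg (b :: t)).2 hc d hd

theorem dts_forall_nonpos : ∀ xs : List Int, (∀ d ∈ dts xs, d ≤ 0) ↔ List.IsChain (fun a b => b ≤ a) xs
  | [] => by simp [dts_nil]
  | [a] => by simp [dts_single, List.isChain_singleton a]
  | a :: b :: t => by
    rw [dts_cons, List.isChain_cons_cons]
    simp only [List.mem_cons]
    constructor
    · intro h
      refine ⟨by have := h (b - a) (Or.inl rfl); omega, ?_⟩
      exact (dts_forall_nonpos (b :: t)).1 (fun d hd => h d (Or.inr hd))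
    · rintro ⟨hab, hc⟩ d hd
      rcases hd with rfl | hd
      · omega
      · exact (dts_forall_nonpos (b :: t)).2 hc d hd

-- a nonzero delta yields two distinct members
theorem dts_distinct : ∀ xs : List Int, ∀ d ∈ dts xs, d ≠ 0 → ∃ a ∈ xs, ∃ b ∈ xs, a ≠ b
  | [] => by simp [dts_nil]
  | [a] => by simp [dts_single]
  | a :: b :: t => by
    rw [dts_cons]
    intro d hd hne
    rcases List.mem_cons.1 hd with rfl | hd
    · exact ⟨a, by simp, b, by simp, by omega⟩
    · obtain ⟨x, hx, y, hy, hxy⟩ := dts_distinct (b :: t) d hd hne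
      exact ⟨x, List.mem_cons_of_mem _ hx, y, List.mem_cons_of_mem _ hy, hxy⟩

-- all deltas zero means all elements equal the head
theorem all_eq_head : ∀ (t : List Int) (a : Int), (∀ d ∈ dts (a :: t), d = 0) → ∀ x ∈ a :: t, x = a
  | [], a => by simp
  | b :: t, a => by
    intro h x hx
    have hba : b = a := by have := h (b - a) (by rw [dts_cons]; simp); omega
    rcases List.mem_cons.1 hx with rfl | hx
    · rfl
    · have := all_eq_head t b (fun d hd => h d (by rw [dts_cons]; exact List.mem_cons_of_mem _ hd)) x hx
      omega

@[reducible] def pairwise_ge_trans : Trans (fun a b : Int => b ≤ a) (fun a b : Int => b ≤ a) (fun a b : Int => b ≤ a) :=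
  ⟨fun h1 h2 => le_trans h2 h1⟩

theorem eq_sorted_iff (xs : List Int) :
    xs = PySem.List.sorted xs (fun x => x) false ↔ List.IsChain (· ≤ ·) xs := by
  rw [List.isChain_iff_pairwise]
  constructor
  · intro h
    have := PySem.List.sorted_pairwise xs (fun x => x)
    rw [← h] at this
    exact this
  · intro h
    exact (PySem.List.sorted_eq_self_of_pairwise xs (fun x => x) h).symm

theorem eq_sorted_rev_iff (xs : List Int) :
    xs = PySem.List.sorted xs (fun x => x) true ↔ List.IsChain (fun a b => b ≤ a) xs := by
  haveI := pairwise_ge_trans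
  rw [List.isChain_iff_pairwise]
  constructor
  · intro h
    have := PySem.List.sorted_pairwise_rev xs (fun x => x)
    rw [← h] at this
    exact this
  · intro h
    exact (PySem.List.sorted_rev_eq_self_of_pairwise xs (fun x => x) h).symm

theorem set_card_gt_one (xs : List Int) :
    1 < (PySem.Set.ofList xs).length ↔ ∃ a ∈ xs, ∃ b ∈ xs, a ≠ b := by
  have hmem : ∀ x : Int, x ∈ PySem.Set.ofList xs ↔ x ∈ xs := fun x => PySem.Set.mem_ofList xs x
  have hnd : (PySem.Set.ofList xs).Nodup := PySem.Set.nodup_ofList xs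
  constructor
  · intro h
    match hS : PySem.Set.ofList xs with
    | [] => rw [hS] at h; simp at h
    | [c] => rw [hS] at h; simp at h
    | c :: d :: t =>
      rw [hS] at hnd hmem
      refine ⟨c, (hmem c).1 (by simp), d, (hmem d).1 (by simp), ?_⟩
      intro hcd
      exact (List.nodup_cons.1 hnd).1 (by simp [hcd])
  · rintro ⟨a, ha, b, hb, hab⟩
    have ha' := (hmem a).2 ha
    have hb' := (hmem b).2 hb
    match hS : PySem.Set.ofList xs with
    | [] => rw [hS] at ha'; simp at ha'
    | [c] =>
      rw [hS] at ha' hb'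
      simp at ha' hb'
      exact absurd (ha'.trans hb'.symm) hab
    | c :: d :: t => simp

-- the whole equivalence, stated over the extracted x-list
theorem core (xs : List Int) :
    (if xs.length < 2 then false
     else
       let nonzero := (dts xs).filter (fun d => d ≠ 0)
       if nonzero = [] then false
       else nonzero.all (fun d => decide (0 < d)) || nonzero.all (fun d => decide (d < 0)))
    = ((decide (xs = PySem.List.sorted xs (fun x => x) false) ||
        decide (xs = PySem.List.sorted xs (fun x => x) true)) &&
       decide (1 < (PySem.Set.ofList xs).length)) := by
  by_cases h2 : xs.length < 2
  · -- fewer than two positions: A returns False; B's distinctness guard fails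
    have hcard : ¬ (1 < (PySem.Set.ofList xs).length) := by
      rw [set_card_gt_one]
      rintro ⟨a, ha, b, hb, hab⟩
      rcases xs with _ | ⟨c, _ | ⟨d, t⟩⟩
      · simp at ha
      · simp at ha hb; exact hab (ha.trans hb.symm)
      · simp at h2
    simp [h2, hcard]
  · rw [if_neg h2]
    obtain ⟨a, b, t, hx⟩ : ∃ a b t, xs = a :: b :: t := by
      rcases xs with _ | ⟨c, _ | ⟨d, t⟩⟩
      · simp at h2
      · simp at h2
      · exact ⟨c, d, t, rfl⟩
    by_cases hnz : (dts xs).filter (fun d => decide ¬(d = 0)) = []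
    · -- all deltas zero: A returns False; all x-values equal, B's guard fails
      have hall : ∀ d ∈ dts xs, d = 0 := by
        intro d hd
        by_contra hne
        have : d ∈ (dts xs).filter (fun d => decide ¬(d = 0)) :=
          List.mem_filter.2 ⟨hd, by simpa using hne⟩
        rw [hnz] at this
        simp at this
      have hcard : ¬ (1 < (PySem.Set.ofList xs).length) := by
        rw [set_card_gt_one]
        rintro ⟨p, hp, q, hq, hpq⟩
        rw [hx] at hall hp hq
        exact hpq ((all_eq_head _ a hall p hp).trans (all_eq_head _ a hall q hq).symm)
      simp only [hnz]
      simp [hcard]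
    · -- some nonzero delta: B's guard holds and the sign test matches monotonicity
      have hd0 : ∃ d ∈ dts xs, d ≠ 0 := by
        match hF : (dts xs).filter (fun d => decide ¬(d = 0)) with
        | [] => exact absurd hF hnz
        | c :: s =>
          have hc : c ∈ (dts xs).filter (fun d => decide ¬(d = 0)) := by rw [hF]; simp
          have hc' := List.mem_filter.1 hc
          exact ⟨c, hc'.1, by simpa using hc'.2⟩
      obtain ⟨d, hd, hdne⟩ := hd0
      have hcard : 1 < (PySem.Set.ofList xs).length :=
        (set_card_gt_one xs).2 (dts_distinct xs d hd hdne)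
      rw [Bool.eq_iff_iff]
      simp only [if_neg hnz, Bool.or_eq_true, Bool.and_eq_true, decide_eq_true_iff,
        List.all_eq_true, List.mem_filter, eq_sorted_iff, eq_sorted_rev_iff,
        ← dts_forall_nonneg, ← dts_forall_nonpos]
      constructor
      · rintro (h | h)
        · refine ⟨Or.inl fun e he => ?_, hcard⟩
          by_cases he0 : e = 0
          · omega
          · have h1 := h e ⟨he, by simpa using he0⟩
            have h1' : (0:Int) < e := by simpa using h1
            omega
        · refine ⟨Or.inr fun e he => ?_, hcard⟩
          by_cases he0 : e = 0
          · omega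
          · have h1 := h e ⟨he, by simpa using he0⟩
            have h1' : e < 0 := by simpa using h1
            omega
      · rintro ⟨h | h, -⟩
        · refine Or.inl fun e he => ?_
          have h1 := h e he.1
          have h2 : e ≠ 0 := by simpa using he.2
          simp
          omega
        · refine Or.inr fun e he => ?_
          have h1 := h e he.1
          have h2 : e ≠ 0 := by simpa using he.2
          simp
          omega

theorem is_consistent_direction_spec : Claim_equal_is_consistent_direction := by
  intro positions _
  unfold Spec_is_consistent_direction is_consistent_direction is_consistent_direction_alt
  simp only [deltas_bridge]
  have hl : (positions.map Prod.fst).length = positions.length := List.length_map _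
  rw [← hl]
  exact core (positions.map Prod.fst)
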